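-- pv_equiv track=rewrite | github.com/ahmedarafa994/chimera | meta_prompter/argus_filter.py | _apply_paraphrase
-- ===== SOURCE A (Python) =====
-- def _apply_paraphrase(text: str) -> str:
--     """
--     Uses simple substitution to break lexical filters.
--     """
--     replacements = {
--         "hack": "penetration test",
--         "steal": "acquire without authorization",
--         "destroy": "deconstruct",
--         "bomb": "energetic disassembly device",
--         "kill": "terminate life functions"
--     }
--     for k, v in replacements.items():
--         if k in text.lower():
--             text = text.replace(k, v)
--     return text
-- ===== SOURCE B (Python) =====
-- def _apply_paraphrase(text: str) -> str:
--     """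
--     Single left-to-right scan: at each position substitute the first matching
--     keyword (longest-first is unnecessary: no key is a prefix of another),
--     otherwise copy the character.  One pass instead of five full-text
--     replace passes, and replacement output is never re-scanned.
--     """
--     replacements = {
--         "hack": "penetration test",
--         "steal": "acquire without authorization",
--         "destroy": "deconstruct",
--         "bomb": "energetic disassembly device",
--         "kill": "terminate life functions",
--     }
--     out = []
--     i = 0
--     n = len(text)
--     while i < n:
--         for k, v in replacements.items():
--             if text.startswith(k, i):
--                 out.append(v)
--                 i += len(k)
--                 break
--         else:
--             out.append(text[i])
--             i += 1
--     return "".join(out)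
-- ===== Notes on version B (the rewrite author's own statement) =====
-- stated objective: alternative
-- what changed: Replaces five sequential full-text str.replace passes (whose output is re-scanned by later passes) with a single left-to-right scan that substitutes each keyword occurrence of the original text exactly once via one table lookup per position.
-- intended difference: On texts containing the substring 'hackeal', A's first pass rewrites 'hack' and its later pass then also rewrites the keyword that this replacement text freshly creates at the junction (A('hackeal') = 'penetration teacquire without authorization'), while B substitutes only keywords present in the original text (B('hackeal') = 'penetration testeal'), which is the intended behaviour of a fixed-keyword substitution: replacement output should not itself be paraphrased. — e.g. on _apply_paraphrase("hackeal"): A returns "penetration teacquire without authorization", B returns "penetration testeal"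
import Mathlib
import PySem

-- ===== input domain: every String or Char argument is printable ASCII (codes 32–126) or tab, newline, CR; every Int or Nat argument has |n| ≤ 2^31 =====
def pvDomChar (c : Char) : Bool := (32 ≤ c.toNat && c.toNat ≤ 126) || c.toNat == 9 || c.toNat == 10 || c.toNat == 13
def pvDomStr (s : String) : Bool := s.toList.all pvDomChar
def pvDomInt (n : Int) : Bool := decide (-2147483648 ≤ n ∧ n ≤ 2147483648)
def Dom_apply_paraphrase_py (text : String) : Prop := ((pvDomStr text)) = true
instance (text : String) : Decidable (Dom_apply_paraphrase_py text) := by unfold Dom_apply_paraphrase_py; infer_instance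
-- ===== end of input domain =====

-- B replaces A's five sequential full-text replace passes by ONE left-to-right scan that
-- substitutes each keyword occurrence of the original text exactly once (alternative algorithm;
-- replacement output is never re-scanned — see D_ below for the one corner where that differs).

-- ===== PORT A =====
-- Literal port of A: iterate over the dict items in insertion order; for each (k, v),
-- if k occurs in text.lower() then text = text.replace(k, v).
def apply_paraphrase_py (text : String) : String :=
  let replacements : List (String × String) :=
    [("hack", "penetration test"),
     ("steal", "acquire without authorization"),
     ("destroy", "deconstruct"),
     ("bomb", "energetic disassembly device"),
     ("kill", "terminate life functions")]
  replacements.foldl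
    (fun t kv => if PySem.Str.isIn kv.1 (PySem.Str.lower t) then PySem.Str.replace t kv.1 kv.2 else t)
    text

-- ===== PORT B =====
-- Port of Source B's while-loop: at each position try the keys in dict order; on a match emit the
-- replacement and advance past the key, otherwise emit the character and advance by one.
def pvScan : List Char → List Char
  | [] => []
  | c :: t =>
    if "hack".toList.isPrefixOf (c :: t) then
      "penetration test".toList ++ pvScan (t.drop 3)
    else if "steal".toList.isPrefixOf (c :: t) then
      "acquire without authorization".toList ++ pvScan (t.drop 4)
    else if "destroy".toList.isPrefixOf (c :: t) then
      "deconstruct".toList ++ pvScan (t.drop 6)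
    else if "bomb".toList.isPrefixOf (c :: t) then
      "energetic disassembly device".toList ++ pvScan (t.drop 3)
    else if "kill".toList.isPrefixOf (c :: t) then
      "terminate life functions".toList ++ pvScan (t.drop 3)
    else
      c :: pvScan t
  termination_by l => l.length
  decreasing_by all_goals simp

def apply_paraphrase_py_alt (text : String) : String :=
  String.ofList (pvScan text.toList)

-- ===== PRECONDITION & SPEC =====
-- On texts containing 'hackeal', A's steal-pass also rewrites the 'steal' freshly created by the
-- junction of the hack-replacement '…test' with the following 'eal'; B substitutes only the
-- keywords of the original text, the intended behaviour of a fixed-keyword substitution.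
def D_apply_paraphrase_py (text : String) : Prop := PySem.Str.isIn "hackeal" text = true
instance (text : String) : Decidable (D_apply_paraphrase_py text) := by
  unfold D_apply_paraphrase_py; infer_instance

def Spec_apply_paraphrase_py (text : String) (out : String) : Prop :=
  ¬ D_apply_paraphrase_py text → out = apply_paraphrase_py_alt text
instance (text : String) (out : String) : Decidable (Spec_apply_paraphrase_py text out) := by
  unfold Spec_apply_paraphrase_py; infer_instance

def pvDiffWitness_apply_paraphrase_py : String := "hackeal"
def pvDiffWitnessOut_apply_paraphrase_py : String × String :=
  ("penetration teacquire without authorization", "penetration testeal")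

-- ===== CLAIM (what is proved, stated in full; the proofs are below) =====
def Claim_unchanged_apply_paraphrase_py : Prop :=
  ∀ (text : String), Dom_apply_paraphrase_py text →
    Spec_apply_paraphrase_py text (apply_paraphrase_py text)
def Claim_changed_apply_paraphrase_py : Prop :=
  Dom_apply_paraphrase_py (pvDiffWitness_apply_paraphrase_py) ∧
  D_apply_paraphrase_py (pvDiffWitness_apply_paraphrase_py) ∧
  apply_paraphrase_py (pvDiffWitness_apply_paraphrase_py) = pvDiffWitnessOut_apply_paraphrase_py.1 ∧
  apply_paraphrase_py_alt (pvDiffWitness_apply_paraphrase_py) = pvDiffWitnessOut_apply_paraphrase_py.2 ∧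
  pvDiffWitnessOut_apply_paraphrase_py.1 ≠ pvDiffWitnessOut_apply_paraphrase_py.2
def Claim_exact_apply_paraphrase_py : Prop :=
  ∀ (text : String), Dom_apply_paraphrase_py text → D_apply_paraphrase_py text →
    apply_paraphrase_py text ≠ apply_paraphrase_py_alt text

-- ===== LEMMAS AND PROOFS =====


-- pvRepl1 o os v l = l.replace(o::os, v), the structural form of PySem.Chars.replace for a
-- nonempty pattern.
def pvRepl1 (o : Char) (os v : List Char) : List Char → List Char
  | [] => []
  | c :: t =>
    if (o :: os).isPrefixOf (c :: t) then v ++ pvRepl1 o os v (t.drop os.length)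
    else c :: pvRepl1 o os v t
  termination_by l => l.length
  decreasing_by all_goals simp

theorem pvRepl1_go (o : Char) (os v : List Char) :
    ∀ (fuel : Nat) (l acc : List Char), l.length ≤ fuel →
      PySem.Chars.replace.go (o :: os) v fuel l acc = acc.reverse ++ pvRepl1 o os v l := by
  intro fuel
  induction fuel with
  | zero =>
    intro l acc h
    have : l = [] := by cases l <;> simp_all
    subst this; simp [PySem.Chars.replace.go, pvRepl1]
  | succ n ih =>
    intro l acc h
    cases l with
    | nil => simp [PySem.Chars.replace.go, pvRepl1]
    | cons c t =>
      rw [PySem.Chars.replace.go, pvRepl1]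
      by_cases hp : (o :: os).isPrefixOf (c :: t)
      · simp only [hp, if_true]
        rw [ih (List.drop (o :: os).length (c :: t)) (v.reverse ++ acc)
            (by simp at h ⊢; omega)]
        simp [List.append_assoc]
      · simp only [hp]
        rw [ih t (c :: acc) (by simp at h; omega)]
        simp

theorem replace_eq_pvRepl1 (o : Char) (os v l : List Char) :
    PySem.Chars.replace l (o :: os) v = pvRepl1 o os v l := by
  rw [PySem.Chars.replace]
  simp [pvRepl1_go o os v l.length l [] (le_refl _)]

theorem pvRepl1_key (o : Char) (os v x : List Char) :
    pvRepl1 o os v ((o :: os) ++ x) = v ++ pvRepl1 o os v x := by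
  rw [show (o :: os) ++ x = o :: (os ++ x) from rfl, pvRepl1]
  have hp : (o :: os).isPrefixOf (o :: (os ++ x)) := by
    rw [List.isPrefixOf_iff_prefix]
    exact ⟨x, rfl⟩
  simp [hp]

theorem pvRepl1_cons (o : Char) (os v : List Char) (c : Char) (t : List Char)
    (h : ¬ (o :: os) <+: (c :: t)) :
    pvRepl1 o os v (c :: t) = c :: pvRepl1 o os v t := by
  rw [pvRepl1, if_neg (fun hb => h (List.isPrefixOf_iff_prefix.mp hb))]

theorem pvRepl1_id (o : Char) (os v : List Char) :
    ∀ l, ¬ (o :: os) <:+: l → pvRepl1 o os v l = l := by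
  intro l
  induction l using pvRepl1.induct o os with
  | case1 => intro _; simp [pvRepl1]
  | case2 c t hp ih =>
    intro h
    exact absurd ((List.isPrefixOf_iff_prefix.mp hp).isInfix) h
  | case3 c t hp ih =>
    intro h
    rw [pvRepl1_cons o os v c t (fun hpre => h hpre.isInfix)]
    rw [ih (fun hin => h (List.infix_cons_iff.mpr (Or.inr hin)))]

-- no occurrence of k starts inside the prefix a ⇒ replace passes over a
theorem pvRepl1_append (o : Char) (os v : List Char) :
    ∀ (a b : List Char), (∀ m, m < a.length → ¬ (o :: os) <+: (a ++ b).drop m) →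
      pvRepl1 o os v (a ++ b) = a ++ pvRepl1 o os v b := by
  intro a
  induction a with
  | nil => intro b _; simp
  | cons c a' ih =>
    intro b h
    rw [List.cons_append, pvRepl1_cons o os v c (a' ++ b) (by
      have := h 0 (by simp)
      simpa using this)]
    rw [ih b (fun m hm => by
      have := h (m + 1) (by simp; omega)
      simpa using this)]
    rfl

-- a mismatch inside u rules out any occurrence of k starting at u's head
theorem npa_one (k u b : List Char) (h : ¬ k.take u.length <+: u) : ¬ k <+: u ++ b := by
  intro hp
  apply h
  obtain ⟨t, ht⟩ := hp
  have h1 : (u ++ b).take u.length = u := by simp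
  have h2 : k.take u.length <+: (u ++ b).take u.length := by
    rw [← ht, List.take_append]
    exact List.prefix_append _ _
  rwa [h1] at h2

theorem npa_all (k a : List Char) (S : List Nat)
    (hchk : decide (∀ m ∈ List.range a.length, m ∉ S →
      ¬ (k.take (a.drop m).length).isPrefixOf (a.drop m)) = true) :
    ∀ (b : List Char) (m : Nat), m < a.length → m ∉ S → ¬ k <+: (a ++ b).drop m := by
  intro b m hm hS hp
  rw [List.drop_append_of_le_length (by omega)] at hp
  have hc := of_decide_eq_true hchk m (List.mem_range.mpr hm) hS
  exact npa_one k (a.drop m) b (fun hpre => hc (List.isPrefixOf_iff_prefix.mpr hpre)) hp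

-- k <+: u ++ b with u <+: k extracts the residual of k into b
theorem prefix_residual (k u b : List Char) (h : k <+: u ++ b) (hu : u <+: k) :
    k.drop u.length <+: b := by
  obtain ⟨k', rfl⟩ := hu
  rw [List.drop_left]
  obtain ⟨t, ht⟩ := h
  rw [List.append_assoc] at ht
  exact ⟨t, List.append_cancel_left ht⟩

-- p survives backwards through a replace pass when no nonempty suffix of p is a prefix of v
theorem prefix_thru_pvRepl1 (o : Char) (os v : List Char)
    (l : List Char) :
    ∀ p : List Char,
      (∀ s₂ ∈ p.tails, s₂ ≠ [] → s₂.length ≤ v.length ∧ ¬ s₂ <+: v) →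
      p <+: pvRepl1 o os v l → p <+: l := by
  induction l using pvRepl1.induct o os with
  | case1 =>
    intro p _ h
    simpa [pvRepl1] using h
  | case2 c t hp ih =>
    intro p htails h
    rcases p with _ | ⟨d, p'⟩
    · exact List.nil_prefix
    rw [pvRepl1] at h
    rw [if_pos hp] at h
    have hself := htails (d :: p') ((List.mem_tails _ _).mpr List.suffix_rfl) (by simp)
    rcases List.prefix_or_prefix_of_prefix h (List.prefix_append v _) with h1 | h1
    · exact absurd h1 hself.2
    · have hlen : v.length = (d :: p').length := le_antisymm h1.length_le hself.1
      have hv : v = d :: p' := h1.eq_of_length hlen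
      exact absurd (by simp [hv] : (d :: p') <+: v) hself.2
  | case3 c t hp ih =>
    intro p htails h
    rw [pvRepl1] at h
    rw [if_neg hp] at h
    rcases p with _ | ⟨d, p'⟩
    · exact List.nil_prefix
    rw [List.cons_prefix_cons] at h ⊢
    refine ⟨h.1, ih p' (fun s₂ hs hne => htails s₂ (by
      rw [List.mem_tails] at hs ⊢
      exact hs.trans (List.suffix_cons _ _)) hne) h.2⟩

-- instantiation helpers: decidable side conditions, concrete keys/values
theorem thru_gen (o : Char) (os v p l : List Char)
    (hch : decide (∀ s₂ ∈ p.tails, s₂ ≠ [] → s₂.length ≤ v.length ∧ ¬ s₂.isPrefixOf v) = true) :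
    p <+: pvRepl1 o os v l → p <+: l := by
  intro h
  refine prefix_thru_pvRepl1 o os v l p ?_ h
  intro s₂ hs hne
  have hd := of_decide_eq_true hch s₂ hs hne
  exact ⟨hd.1, fun hp => hd.2 (List.isPrefixOf_iff_prefix.mpr hp)⟩

theorem pass_clean (o : Char) (os v a : List Char)
    (hchk : decide (∀ m ∈ List.range a.length, m ∉ ([] : List Nat) →
      ¬ (((o :: os).take (a.drop m).length).isPrefixOf (a.drop m))) = true)
    (b : List Char) : pvRepl1 o os v (a ++ b) = a ++ pvRepl1 o os v b :=
  pvRepl1_append o os v a b (fun m hm => npa_all (o :: os) a [] hchk b m hm (by simp))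

-- the hack-value / steal junction: safe as long as b does not start with 'eal'
theorem pass_v1_steal (b : List Char) (hb : ¬ "eal".toList <+: b) :
    pvRepl1 's' "teal".toList "acquire without authorization".toList ("penetration test".toList ++ b)
      = "penetration test".toList ++
        pvRepl1 's' "teal".toList "acquire without authorization".toList b := by
  apply pvRepl1_append
  intro m hm
  by_cases h14 : m = 14
  · subst h14
    intro hpre
    rw [List.drop_append_of_le_length (by simp)] at hpre
    rw [show "penetration test".toList.drop 14 = "st".toList from rfl] at hpre
    have hres := prefix_residual ('s' :: "teal".toList) "st".toList b hpre (by decide)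
    rw [show ('s' :: "teal".toList).drop "st".toList.length = "eal".toList from rfl] at hres
    exact hb hres
  · exact npa_all ('s' :: "teal".toList) "penetration test".toList [14]
      (by decide) b m hm (by simp [h14])

def pvSeq (l : List Char) : List Char :=
  pvRepl1 'k' "ill".toList "terminate life functions".toList
    (pvRepl1 'b' "omb".toList "energetic disassembly device".toList
      (pvRepl1 'd' "estroy".toList "deconstruct".toList
        (pvRepl1 's' "teal".toList "acquire without authorization".toList
          (pvRepl1 'h' "ack".toList "penetration test".toList l))))

theorem seq_hack (rest : List Char) (heal : ¬ "eal".toList <+: rest) :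
    pvSeq ("hack".toList ++ rest) = "penetration test".toList ++ pvSeq rest := by
  have hbX : ¬ "eal".toList <+: pvRepl1 'h' "ack".toList "penetration test".toList rest :=
    fun h => heal (thru_gen _ _ _ _ _ (by decide) h)
  rw [pvSeq]
  rw [show "hack".toList = 'h' :: "ack".toList from rfl, pvRepl1_key]
  rw [pass_v1_steal _ hbX]
  rw [pass_clean 'd' "estroy".toList _ _ (by decide)]
  rw [pass_clean 'b' "omb".toList _ _ (by decide)]
  rw [pass_clean 'k' "ill".toList _ _ (by decide)]
  rw [← pvSeq]

theorem seq_steal (rest : List Char) :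
    pvSeq ("steal".toList ++ rest) = "acquire without authorization".toList ++ pvSeq rest := by
  rw [pvSeq]
  rw [pass_clean 'h' "ack".toList _ _ (by decide)]
  rw [show "steal".toList = 's' :: "teal".toList from rfl, pvRepl1_key]
  rw [pass_clean 'd' "estroy".toList _ _ (by decide)]
  rw [pass_clean 'b' "omb".toList _ _ (by decide)]
  rw [pass_clean 'k' "ill".toList _ _ (by decide)]
  rw [← pvSeq]

theorem seq_destroy (rest : List Char) :
    pvSeq ("destroy".toList ++ rest) = "deconstruct".toList ++ pvSeq rest := by
  rw [pvSeq]
  rw [pass_clean 'h' "ack".toList _ _ (by decide)]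
  rw [pass_clean 's' "teal".toList _ _ (by decide)]
  rw [show "destroy".toList = 'd' :: "estroy".toList from rfl, pvRepl1_key]
  rw [pass_clean 'b' "omb".toList _ _ (by decide)]
  rw [pass_clean 'k' "ill".toList _ _ (by decide)]
  rw [← pvSeq]

theorem seq_bomb (rest : List Char) :
    pvSeq ("bomb".toList ++ rest) = "energetic disassembly device".toList ++ pvSeq rest := by
  rw [pvSeq]
  rw [pass_clean 'h' "ack".toList _ _ (by decide)]
  rw [pass_clean 's' "teal".toList _ _ (by decide)]
  rw [pass_clean 'd' "estroy".toList _ _ (by decide)]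
  rw [show "bomb".toList = 'b' :: "omb".toList from rfl, pvRepl1_key]
  rw [pass_clean 'k' "ill".toList _ _ (by decide)]
  rw [← pvSeq]

theorem seq_kill (rest : List Char) :
    pvSeq ("kill".toList ++ rest) = "terminate life functions".toList ++ pvSeq rest := by
  rw [pvSeq]
  rw [pass_clean 'h' "ack".toList _ _ (by decide)]
  rw [pass_clean 's' "teal".toList _ _ (by decide)]
  rw [pass_clean 'd' "estroy".toList _ _ (by decide)]
  rw [pass_clean 'b' "omb".toList _ _ (by decide)]
  rw [show "kill".toList = 'k' :: "ill".toList from rfl, pvRepl1_key]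
  rw [← pvSeq]

theorem seq_cons (c : Char) (t : List Char)
    (hn1 : ¬ "hack".toList <+: (c :: t))
    (hn2 : ¬ "steal".toList <+: (c :: t))
    (hn3 : ¬ "destroy".toList <+: (c :: t))
    (hn4 : ¬ "bomb".toList <+: (c :: t))
    (hn5 : ¬ "kill".toList <+: (c :: t)) :
    pvSeq (c :: t) = c :: pvSeq t := by
  rw [pvSeq]
  rw [pvRepl1_cons 'h' "ack".toList _ c t hn1]
  rw [pvRepl1_cons 's' "teal".toList _ c _ (by
    intro hpr
    rw [List.cons_prefix_cons] at hpr
    have h2 := thru_gen 'h' "ack".toList "penetration test".toList "teal".toList t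
      (by decide) hpr.2
    exact hn2 (by
      rw [show "steal".toList = 's' :: "teal".toList from rfl]
      exact List.cons_prefix_cons.mpr ⟨hpr.1, h2⟩))]
  rw [pvRepl1_cons 'd' "estroy".toList _ c _ (by
    intro hpr
    rw [List.cons_prefix_cons] at hpr
    have h2 := thru_gen 's' "teal".toList "acquire without authorization".toList "estroy".toList _
      (by decide) hpr.2
    have h3 := thru_gen 'h' "ack".toList "penetration test".toList "estroy".toList t
      (by decide) h2
    exact hn3 (by
      rw [show "destroy".toList = 'd' :: "estroy".toList from rfl]
      exact List.cons_prefix_cons.mpr ⟨hpr.1, h3⟩))]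
  rw [pvRepl1_cons 'b' "omb".toList _ c _ (by
    intro hpr
    rw [List.cons_prefix_cons] at hpr
    have h2 := thru_gen 'd' "estroy".toList "deconstruct".toList "omb".toList _
      (by decide) hpr.2
    have h3 := thru_gen 's' "teal".toList "acquire without authorization".toList "omb".toList _
      (by decide) h2
    have h4 := thru_gen 'h' "ack".toList "penetration test".toList "omb".toList t
      (by decide) h3
    exact hn4 (by
      rw [show "bomb".toList = 'b' :: "omb".toList from rfl]
      exact List.cons_prefix_cons.mpr ⟨hpr.1, h4⟩))]
  rw [pvRepl1_cons 'k' "ill".toList _ c _ (by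
    intro hpr
    rw [List.cons_prefix_cons] at hpr
    have h2 := thru_gen 'b' "omb".toList "energetic disassembly device".toList "ill".toList _
      (by decide) hpr.2
    have h3 := thru_gen 'd' "estroy".toList "deconstruct".toList "ill".toList _
      (by decide) h2
    have h4 := thru_gen 's' "teal".toList "acquire without authorization".toList "ill".toList _
      (by decide) h3
    have h5 := thru_gen 'h' "ack".toList "penetration test".toList "ill".toList t
      (by decide) h4
    exact hn5 (by
      rw [show "kill".toList = 'k' :: "ill".toList from rfl]
      exact List.cons_prefix_cons.mpr ⟨hpr.1, h5⟩))]
  rw [← pvSeq]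

theorem pvScan_hack (x : List Char) :
    pvScan ("hack".toList ++ x) = "penetration test".toList ++ pvScan x := by
  rw [show "hack".toList ++ x = 'h' :: ("ack".toList ++ x) from rfl, pvScan]
  rw [if_pos (show "hack".toList.isPrefixOf ('h' :: ("ack".toList ++ x)) = true from
    List.isPrefixOf_iff_prefix.mpr ⟨x, rfl⟩)]
  rfl

-- every occurrence of 'hackeal' in a ++ b that cannot start inside a starts in b
theorem hackeal_shift (a b : List Char)
    (hnpa : ∀ m, m < a.length → ¬ "hackeal".toList <+: (a ++ b).drop m)
    (h : "hackeal".toList <:+: a ++ b) : "hackeal".toList <:+: b := by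
  obtain ⟨j, hj⟩ := (PySem.Chars.exists_prefix_drop_iff_isIn _ _).mpr
    ((PySem.Chars.isIn_iff_infix _ _).mpr h)
  rcases lt_or_ge j a.length with hlt | hge
  · exact absurd hj (hnpa j hlt)
  · have hdrop : (a ++ b).drop j = b.drop (j - a.length) := by
      rw [List.drop_append, List.drop_eq_nil_of_le (by omega)]
      rfl
    rw [hdrop] at hj
    exact (PySem.Chars.isIn_iff_infix _ _).mp
      ((PySem.Chars.exists_prefix_drop_iff_isIn _ _).mp ⟨_, hj⟩)

theorem seq_eq_scan : ∀ l : List Char, ¬ ("hackeal".toList <:+: l) → pvSeq l = pvScan l := by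
  intro l
  induction l using pvScan.induct with
  | case1 => intro _; simp [pvSeq, pvRepl1, pvScan]
  | case2 c t hp ih =>
    intro hL
    have hpre : "hack".toList <+: (c :: t) := List.isPrefixOf_iff_prefix.mp hp
    have h4 := List.prefix_iff_eq_take.mp hpre
    rw [show "hack".toList.length = 4 from rfl] at h4
    have hsplit : c :: t = "hack".toList ++ t.drop 3 := by
      conv_lhs => rw [← List.take_append_drop 4 (c :: t)]
      rw [← h4]
      rfl
    have hR : ¬ ("hackeal".toList <:+: t.drop 3) := fun hi =>
      hL (hi.trans ((List.drop_suffix 3 t).trans (List.suffix_cons c t)).isInfix)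
    have heal : ¬ ("eal".toList <+: t.drop 3) := by
      intro he
      apply hL
      apply List.IsPrefix.isInfix
      rw [hsplit, show "hackeal".toList = "hack".toList ++ "eal".toList from rfl]
      exact (List.prefix_append_right_inj _).mpr he
    rw [hsplit, seq_hack _ heal]
    rw [show pvScan ("hack".toList ++ t.drop 3) = "penetration test".toList ++ pvScan (t.drop 3) from by
      rw [← hsplit, pvScan]; rw [if_pos hp]]
    rw [ih hR]
  | case3 c t hp1 hp ih =>
    intro hL
    have hpre : "steal".toList <+: (c :: t) := List.isPrefixOf_iff_prefix.mp hp
    have h4 := List.prefix_iff_eq_take.mp hpre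
    rw [show "steal".toList.length = 5 from rfl] at h4
    have hsplit : c :: t = "steal".toList ++ t.drop 4 := by
      conv_lhs => rw [← List.take_append_drop 5 (c :: t)]
      rw [← h4]
      rfl
    have hR : ¬ ("hackeal".toList <:+: t.drop 4) := fun hi =>
      hL (hi.trans ((List.drop_suffix 4 t).trans (List.suffix_cons c t)).isInfix)
    rw [hsplit, seq_steal]
    rw [show pvScan ("steal".toList ++ t.drop 4) = "acquire without authorization".toList ++ pvScan (t.drop 4) from by
      rw [← hsplit, pvScan]; rw [if_neg hp1, if_pos hp]]
    rw [ih hR]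
  | case4 c t hp1 hp2 hp ih =>
    intro hL
    have hpre : "destroy".toList <+: (c :: t) := List.isPrefixOf_iff_prefix.mp hp
    have h4 := List.prefix_iff_eq_take.mp hpre
    rw [show "destroy".toList.length = 7 from rfl] at h4
    have hsplit : c :: t = "destroy".toList ++ t.drop 6 := by
      conv_lhs => rw [← List.take_append_drop 7 (c :: t)]
      rw [← h4]
      rfl
    have hR : ¬ ("hackeal".toList <:+: t.drop 6) := fun hi =>
      hL (hi.trans ((List.drop_suffix 6 t).trans (List.suffix_cons c t)).isInfix)
    rw [hsplit, seq_destroy]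
    rw [show pvScan ("destroy".toList ++ t.drop 6) = "deconstruct".toList ++ pvScan (t.drop 6) from by
      rw [← hsplit, pvScan]; rw [if_neg hp1, if_neg hp2, if_pos hp]]
    rw [ih hR]
  | case5 c t hp1 hp2 hp3 hp ih =>
    intro hL
    have hpre : "bomb".toList <+: (c :: t) := List.isPrefixOf_iff_prefix.mp hp
    have h4 := List.prefix_iff_eq_take.mp hpre
    rw [show "bomb".toList.length = 4 from rfl] at h4
    have hsplit : c :: t = "bomb".toList ++ t.drop 3 := by
      conv_lhs => rw [← List.take_append_drop 4 (c :: t)]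
      rw [← h4]
      rfl
    have hR : ¬ ("hackeal".toList <:+: t.drop 3) := fun hi =>
      hL (hi.trans ((List.drop_suffix 3 t).trans (List.suffix_cons c t)).isInfix)
    rw [hsplit, seq_bomb]
    rw [show pvScan ("bomb".toList ++ t.drop 3) = "energetic disassembly device".toList ++ pvScan (t.drop 3) from by
      rw [← hsplit, pvScan]; rw [if_neg hp1, if_neg hp2, if_neg hp3, if_pos hp]]
    rw [ih hR]
  | case6 c t hp1 hp2 hp3 hp4 hp ih =>
    intro hL
    have hpre : "kill".toList <+: (c :: t) := List.isPrefixOf_iff_prefix.mp hp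
    have h4 := List.prefix_iff_eq_take.mp hpre
    rw [show "kill".toList.length = 4 from rfl] at h4
    have hsplit : c :: t = "kill".toList ++ t.drop 3 := by
      conv_lhs => rw [← List.take_append_drop 4 (c :: t)]
      rw [← h4]
      rfl
    have hR : ¬ ("hackeal".toList <:+: t.drop 3) := fun hi =>
      hL (hi.trans ((List.drop_suffix 3 t).trans (List.suffix_cons c t)).isInfix)
    rw [hsplit, seq_kill]
    rw [show pvScan ("kill".toList ++ t.drop 3) = "terminate life functions".toList ++ pvScan (t.drop 3) from by
      rw [← hsplit, pvScan]; rw [if_neg hp1, if_neg hp2, if_neg hp3, if_neg hp4, if_pos hp]]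
    rw [ih hR]
  | case7 c t hp1 hp2 hp3 hp4 hp5 ih =>
    intro hL
    have ht : ¬ ("hackeal".toList <:+: t) := fun hi =>
      hL (List.infix_cons_iff.mpr (Or.inr hi))
    rw [seq_cons c t (fun h => hp1 (List.isPrefixOf_iff_prefix.mpr h))
      (fun h => hp2 (List.isPrefixOf_iff_prefix.mpr h))
      (fun h => hp3 (List.isPrefixOf_iff_prefix.mpr h))
      (fun h => hp4 (List.isPrefixOf_iff_prefix.mpr h))
      (fun h => hp5 (List.isPrefixOf_iff_prefix.mpr h))]
    rw [show pvScan (c :: t) = c :: pvScan t from by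
      rw [pvScan]; rw [if_neg hp1, if_neg hp2, if_neg hp3, if_neg hp4, if_neg hp5]]
    rw [ih ht]

theorem seq_ne_scan : ∀ l : List Char, "hackeal".toList <:+: l → pvSeq l ≠ pvScan l := by
  intro l
  induction l using pvScan.induct with
  | case1 => intro h; simp at h
  | case2 c t hp ih =>
    intro hD
    have hpre : "hack".toList <+: (c :: t) := List.isPrefixOf_iff_prefix.mp hp
    have h4 := List.prefix_iff_eq_take.mp hpre
    rw [show "hack".toList.length = 4 from rfl] at h4
    have hsplit : c :: t = "hack".toList ++ t.drop 3 := by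
      conv_lhs => rw [← List.take_append_drop 4 (c :: t)]
      rw [← h4]
      rfl
    rw [hsplit] at hD ⊢
    by_cases heal : "eal".toList <+: t.drop 3
    · -- the junction fires: the outputs differ at character 14 ('a' vs 's')
      obtain ⟨l₂, hl2⟩ := heal
      rw [← hl2]
      have e1 : pvSeq ("hack".toList ++ ("eal".toList ++ l₂))
          = "penetration teacquire without authorization".toList ++ pvSeq l₂ := by
        rw [pvSeq]
        rw [show "hack".toList = 'h' :: "ack".toList from rfl, pvRepl1_key]
        rw [pass_clean 'h' "ack".toList _ _ (by decide)]
        rw [show "penetration test".toList ++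
            ("eal".toList ++ pvRepl1 'h' "ack".toList "penetration test".toList l₂)
          = "penetration te".toList ++
            (('s' :: "teal".toList) ++ pvRepl1 'h' "ack".toList "penetration test".toList l₂)
          from rfl]
        rw [pass_clean 's' "teal".toList _ _ (by decide)]
        rw [pvRepl1_key]
        rw [show "penetration te".toList ++ ("acquire without authorization".toList ++
            pvRepl1 's' "teal".toList "acquire without authorization".toList
              (pvRepl1 'h' "ack".toList "penetration test".toList l₂))
          = "penetration teacquire without authorization".toList ++
            pvRepl1 's' "teal".toList "acquire without authorization".toList
              (pvRepl1 'h' "ack".toList "penetration test".toList l₂)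
          from rfl]
        rw [pass_clean 'd' "estroy".toList _ _ (by decide)]
        rw [pass_clean 'b' "omb".toList _ _ (by decide)]
        rw [pass_clean 'k' "ill".toList _ _ (by decide)]
        rw [← pvSeq]
      rw [e1, pvScan_hack]
      intro h
      have h2 : "penetration te".toList ++
          ('a' :: ("cquire without authorization".toList ++ pvSeq l₂))
        = "penetration te".toList ++
          ('s' :: ('t' :: pvScan ("eal".toList ++ l₂))) := h
      have h3 := List.append_cancel_left h2
      injection h3 with h5 h6
      exact absurd h5 (by decide)
    · -- the occurrence lies beyond the leading 'hack'
      have hsh : "hackeal".toList <:+: t.drop 3 :=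
        hackeal_shift "hack".toList _ (fun m hm => by
          by_cases h0 : m = 0
          · subst h0
            intro hpp
            simp only [List.drop_zero] at hpp
            have hres := prefix_residual "hackeal".toList "hack".toList _ hpp (by decide)
            exact heal (by
              rwa [show ("hackeal".toList).drop "hack".toList.length = "eal".toList from rfl]
                at hres)
          · exact npa_all "hackeal".toList "hack".toList [0] (by decide) _ m hm
              (by simp [h0])) hD
      rw [seq_hack _ heal, pvScan_hack]
      intro h
      exact ih hsh (List.append_cancel_left h)
  | case3 c t hp1 hp ih =>
    intro hD
    have hpre : "steal".toList <+: (c :: t) := List.isPrefixOf_iff_prefix.mp hp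
    have h4 := List.prefix_iff_eq_take.mp hpre
    rw [show "steal".toList.length = 5 from rfl] at h4
    have hsplit : c :: t = "steal".toList ++ t.drop 4 := by
      conv_lhs => rw [← List.take_append_drop 5 (c :: t)]
      rw [← h4]
      rfl
    rw [hsplit] at hD ⊢
    have hsh : "hackeal".toList <:+: t.drop 4 :=
      hackeal_shift "steal".toList _ (fun m hm =>
        npa_all "hackeal".toList "steal".toList [] (by decide) _ m hm (by simp)) hD
    rw [seq_steal]
    rw [show pvScan ("steal".toList ++ t.drop 4) = "acquire without authorization".toList ++ pvScan (t.drop 4) from by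
      rw [← hsplit, pvScan]; rw [if_neg hp1, if_pos hp]]
    intro h
    exact ih hsh (List.append_cancel_left h)
  | case4 c t hp1 hp2 hp ih =>
    intro hD
    have hpre : "destroy".toList <+: (c :: t) := List.isPrefixOf_iff_prefix.mp hp
    have h4 := List.prefix_iff_eq_take.mp hpre
    rw [show "destroy".toList.length = 7 from rfl] at h4
    have hsplit : c :: t = "destroy".toList ++ t.drop 6 := by
      conv_lhs => rw [← List.take_append_drop 7 (c :: t)]
      rw [← h4]
      rfl
    rw [hsplit] at hD ⊢
    have hsh : "hackeal".toList <:+: t.drop 6 :=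
      hackeal_shift "destroy".toList _ (fun m hm =>
        npa_all "hackeal".toList "destroy".toList [] (by decide) _ m hm (by simp)) hD
    rw [seq_destroy]
    rw [show pvScan ("destroy".toList ++ t.drop 6) = "deconstruct".toList ++ pvScan (t.drop 6) from by
      rw [← hsplit, pvScan]; rw [if_neg hp1, if_neg hp2, if_pos hp]]
    intro h
    exact ih hsh (List.append_cancel_left h)
  | case5 c t hp1 hp2 hp3 hp ih =>
    intro hD
    have hpre : "bomb".toList <+: (c :: t) := List.isPrefixOf_iff_prefix.mp hp
    have h4 := List.prefix_iff_eq_take.mp hpre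
    rw [show "bomb".toList.length = 4 from rfl] at h4
    have hsplit : c :: t = "bomb".toList ++ t.drop 3 := by
      conv_lhs => rw [← List.take_append_drop 4 (c :: t)]
      rw [← h4]
      rfl
    rw [hsplit] at hD ⊢
    have hsh : "hackeal".toList <:+: t.drop 3 :=
      hackeal_shift "bomb".toList _ (fun m hm =>
        npa_all "hackeal".toList "bomb".toList [] (by decide) _ m hm (by simp)) hD
    rw [seq_bomb]
    rw [show pvScan ("bomb".toList ++ t.drop 3) = "energetic disassembly device".toList ++ pvScan (t.drop 3) from by
      rw [← hsplit, pvScan]; rw [if_neg hp1, if_neg hp2, if_neg hp3, if_pos hp]]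
    intro h
    exact ih hsh (List.append_cancel_left h)
  | case6 c t hp1 hp2 hp3 hp4 hp ih =>
    intro hD
    have hpre : "kill".toList <+: (c :: t) := List.isPrefixOf_iff_prefix.mp hp
    have h4 := List.prefix_iff_eq_take.mp hpre
    rw [show "kill".toList.length = 4 from rfl] at h4
    have hsplit : c :: t = "kill".toList ++ t.drop 3 := by
      conv_lhs => rw [← List.take_append_drop 4 (c :: t)]
      rw [← h4]
      rfl
    rw [hsplit] at hD ⊢
    have hsh : "hackeal".toList <:+: t.drop 3 :=
      hackeal_shift "kill".toList _ (fun m hm =>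
        npa_all "hackeal".toList "kill".toList [] (by decide) _ m hm (by simp)) hD
    rw [seq_kill]
    rw [show pvScan ("kill".toList ++ t.drop 3) = "terminate life functions".toList ++ pvScan (t.drop 3) from by
      rw [← hsplit, pvScan]; rw [if_neg hp1, if_neg hp2, if_neg hp3, if_neg hp4, if_pos hp]]
    intro h
    exact ih hsh (List.append_cancel_left h)
  | case7 c t hp1 hp2 hp3 hp4 hp5 ih =>
    intro hD
    have hsh : "hackeal".toList <:+: t := by
      rcases List.infix_cons_iff.mp hD with hpr | hin
      · exact absurd (List.IsPrefix.trans (⟨"eal".toList, rfl⟩ : "hack".toList <+: "hackeal".toList) hpr)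
          (fun h => hp1 (List.isPrefixOf_iff_prefix.mpr h))
      · exact hin
    rw [seq_cons c t (fun h => hp1 (List.isPrefixOf_iff_prefix.mpr h))
      (fun h => hp2 (List.isPrefixOf_iff_prefix.mpr h))
      (fun h => hp3 (List.isPrefixOf_iff_prefix.mpr h))
      (fun h => hp4 (List.isPrefixOf_iff_prefix.mpr h))
      (fun h => hp5 (List.isPrefixOf_iff_prefix.mpr h))]
    rw [show pvScan (c :: t) = c :: pvScan t from by
      rw [pvScan]; rw [if_neg hp1, if_neg hp2, if_neg hp3, if_neg hp4, if_neg hp5]]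
    intro h
    injection h with _ h2
    exact ih hsh h2

-- one guarded pass of A equals one pvRepl1 pass (the guard is redundant: if the lowercase key
-- does not occur in text.lower() it does not occur in text, and then replace is the identity)
theorem stepS (o : Char) (os : List Char) (kS vS : String)
    (hk : kS.toList = o :: os)
    (hlow : PySem.Chars.lower (o :: os) = o :: os) (t : String) :
    (if PySem.Str.isIn kS (PySem.Str.lower t) then PySem.Str.replace t kS vS else t)
      = String.ofList (pvRepl1 o os vS.toList t.toList) := by
  by_cases h : PySem.Str.isIn kS (PySem.Str.lower t) = true
  · rw [if_pos h, PySem.Str.replace, hk, replace_eq_pvRepl1]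
  · rw [if_neg h]
    have hni : ¬ (o :: os) <:+: t.toList := by
      intro hi
      apply h
      rw [PySem.Str.isIn_iff_infix, hk, PySem.Str.toList_lower]
      have hmap := hi.map PySem.Chars.lowerChar
      rwa [show List.map PySem.Chars.lowerChar (o :: os) = PySem.Chars.lower (o :: os) from rfl,
        hlow, show List.map PySem.Chars.lowerChar t.toList = PySem.Chars.lower t.toList from rfl]
        at hmap
    rw [pvRepl1_id o os vS.toList t.toList hni]
    simp

theorem A_eq (s : String) : apply_paraphrase_py s = String.ofList (pvSeq s.toList) := by
  rw [apply_paraphrase_py]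
  simp only [List.foldl]
  rw [stepS 'k' "ill".toList _ _ rfl (by decide)]
  rw [stepS 'b' "omb".toList _ _ rfl (by decide)]
  rw [stepS 'd' "estroy".toList _ _ rfl (by decide)]
  rw [stepS 's' "teal".toList _ _ rfl (by decide)]
  rw [stepS 'h' "ack".toList _ _ rfl (by decide) s]
  simp [pvSeq]

-- ===== VERDICT (by name: the statement is the Claim_ definition above) =====
theorem apply_paraphrase_py_spec : Claim_unchanged_apply_paraphrase_py := by
  intro text _ hD
  rw [A_eq, apply_paraphrase_py_alt,
    seq_eq_scan text.toList (fun hi => hD ((PySem.Str.isIn_iff_infix "hackeal" text).mpr hi))]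

theorem apply_paraphrase_py_changed : Claim_changed_apply_paraphrase_py := by
  unfold Claim_changed_apply_paraphrase_py
  refine ⟨by decide, by decide, ?_, ?_, by decide⟩
  · rw [A_eq]
    rw [show pvSeq pvDiffWitness_apply_paraphrase_py.toList
      = pvDiffWitnessOut_apply_paraphrase_py.1.toList from by
        simp [pvSeq, pvRepl1, pvDiffWitness_apply_paraphrase_py, pvDiffWitnessOut_apply_paraphrase_py]]
    simp
  · rw [show apply_paraphrase_py_alt pvDiffWitness_apply_paraphrase_py
      = String.ofList (pvScan pvDiffWitness_apply_paraphrase_py.toList) from rfl]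
    rw [show pvScan pvDiffWitness_apply_paraphrase_py.toList
      = pvDiffWitnessOut_apply_paraphrase_py.2.toList from by
        simp [pvScan, pvDiffWitness_apply_paraphrase_py, pvDiffWitnessOut_apply_paraphrase_py]]
    simp

theorem apply_paraphrase_py_tight : Claim_exact_apply_paraphrase_py := by
  intro text _ hD h
  rw [A_eq, apply_paraphrase_py_alt] at h
  have h2 := congrArg String.toList h
  simp only [String.toList_ofList] at h2
  exact seq_ne_scan text.toList ((PySem.Str.isIn_iff_infix "hackeal" text).mp hD) h2
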